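-- pv_equiv track=rewrite | github.com/LeiLiLab/InfiniSST | eval/elapsed_xi.py | get_speech_frame_list
-- ===== SOURCE A (Python) =====
-- def get_speech_frame_list(delays):
--     """
--     Generate the speech frame list based on the delays.
--     This function calculates the frame duration for each speech segment.
--
--     Args:
--         delays (list): A list of delays in seconds.
--
--     Returns:
--         list: A list of frame durations (time between consecutive delays).
--     """
--     speech_frame_list = []
--
--     for i in range(len(delays)):
--         if i == len(delays) - 1:
--             # Last element, no subsequent delay, assign 0
--             speech_frame_list.append(0)
--         else:
--             next_different = next((delays[j] for j in range(i + 1, len(delays)) if delays[j] != delays[i]), None)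
--             if next_different is None:
--                 # No different delay found, assign 0
--                 speech_frame_list.append(0)
--             else:
--                 # Calculate the difference between current and next different delay
--                 speech_frame_list.append(next_different - delays[i])
--
--     return speech_frame_list
-- ===== SOURCE B (Python) =====
-- def get_speech_frame_list(delays):
--     """O(n) right-to-left pass: carry the element to the right and reuse the
--     neighbour's answer when the values are equal."""
--     res = []
--     prev = None
--     ans = 0
--     for d in reversed(delays):
--         if prev is None:
--             ans = 0
--         elif prev != d:
--             ans = prev - d
--         res.append(ans)
--         prev = d
--     return res[::-1]
-- ===== Notes on version B (the rewrite author's own statement) =====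
-- stated objective: faster
-- what changed: Replaced the per-index inner scan for the next different delay by a single right-to-left pass that carries the right neighbour and reuses the neighbour's answer when the values are equal.
import Mathlib
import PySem

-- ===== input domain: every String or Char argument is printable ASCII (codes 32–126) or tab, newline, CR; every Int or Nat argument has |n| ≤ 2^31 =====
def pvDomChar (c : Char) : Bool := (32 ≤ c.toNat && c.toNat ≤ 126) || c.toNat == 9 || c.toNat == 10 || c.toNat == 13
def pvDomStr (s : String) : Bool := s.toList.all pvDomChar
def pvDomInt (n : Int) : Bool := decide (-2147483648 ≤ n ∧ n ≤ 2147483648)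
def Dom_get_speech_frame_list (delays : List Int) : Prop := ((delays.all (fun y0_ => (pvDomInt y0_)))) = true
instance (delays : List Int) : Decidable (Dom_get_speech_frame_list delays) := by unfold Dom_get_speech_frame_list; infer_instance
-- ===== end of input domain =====

-- B replaces A's per-index inner scan by one right-to-left pass; equal return values proved below.

-- ===== PORT A =====
-- the generator 'next((delays[j] for j in range(i+1, len(delays)) if delays[j] != delays[i]), None)'
def aNext (delays : List Int) (di : Int) (i : Int) : Option Int :=
  (PySem.List.pyRange (i + 1) delays.length 1).findSome? (fun j =>
    match PySem.List.pyGet? delays j with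
    | some v => if v ≠ di then some v else none
    | none => none)

def get_speech_frame_list (delays : List Int) : List Int :=
  (PySem.List.pyRange 0 delays.length 1).foldl
    (fun acc i =>
      if i = (delays.length : Int) - 1 then acc ++ [0]
      else
        -- delays[i]: loop index, always in range
        let di := PySem.List.pyGetD delays i 0
        match aNext delays di i with
        | none => acc ++ [0]
        | some v => acc ++ [v - di]) []

-- ===== PORT B =====
-- one step of B's loop body: state (prev, ans, res), next element d (right-to-left)
def altStep (st : Option Int × Int × List Int) (d : Int) : Option Int × Int × List Int :=
  match st with
  | (prev, ans, res) =>
    let ans' :=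
      match prev with
      | none => 0
      | some p => if p ≠ d then p - d else ans
    (some d, ans', res ++ [ans'])

def get_speech_frame_list_alt (delays : List Int) : List Int :=
  (delays.reverse.foldl altStep (none, 0, [])).2.2.reverse

-- ===== PRECONDITION & SPEC =====
def Spec_get_speech_frame_list (delays : List Int) (out : List Int) : Prop := out = get_speech_frame_list_alt delays
instance (delays : List Int) (out : List Int) : Decidable (Spec_get_speech_frame_list delays out) := by unfold Spec_get_speech_frame_list; infer_instance

-- ===== CLAIM (what is proved, stated in full; the proofs are below) =====
def Claim_equal_get_speech_frame_list : Prop := ∀ (delays : List Int), Dom_get_speech_frame_list delays → Spec_get_speech_frame_list delays (get_speech_frame_list delays)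

-- ===== LEMMAS AND PROOFS =====

-- reference function: head value is the gap to the first different element to the right
def specF : List Int → List Int
  | [] => []
  | d :: ds =>
    (match ds.find? (fun v => decide (v ≠ d)) with
     | some v => v - d
     | none => 0) :: specF ds

-- per-index value of A, expressed over drops
def wA (delays : List Int) (k : Nat) : Int :=
  match (delays.drop (k + 1)).find? (fun v => decide (v ≠ delays.getD k 0)) with
  | some v => v - delays.getD k 0
  | none => 0

-- per-index value of A as written (over Int index)
def gA (delays : List Int) (i : Int) : Int :=
  if i = (delays.length : Int) - 1 then 0
  else
    let di := PySem.List.pyGetD delays i 0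
    match aNext delays di i with
    | none => 0
    | some v => v - di

theorem findSome_pyRange (delays : List Int) (c : Int) (a : Nat) :
    (PySem.List.pyRange (a : Int) (delays.length : Int) 1).findSome? (fun j =>
      match PySem.List.pyGet? delays j with
      | some v => if v ≠ c then some v else none
      | none => none)
    = (delays.drop a).find? (fun v => decide (v ≠ c)) := by
  have key : ∀ (m a : Nat), delays.length - a ≤ m →
      (PySem.List.pyRange (a : Int) (delays.length : Int) 1).findSome? (fun j =>
        match PySem.List.pyGet? delays j with
        | some v => if v ≠ c then some v else none
        | none => none)
      = (delays.drop a).find? (fun v => decide (v ≠ c)) := by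
    intro m
    induction m with
    | zero =>
      intro a ha
      have hle : delays.length ≤ a := by omega
      rw [PySem.List.pyRange_one_eq_nil (by exact_mod_cast hle), List.drop_eq_nil_of_le hle]
      rfl
    | succ m ih =>
      intro a ha
      by_cases h : a < delays.length
      · rw [PySem.List.pyRange_one_cons (by exact_mod_cast h)]
        have hcast : ((a : Int) + 1) = ((a + 1 : Nat) : Int) := by push_cast; ring
        rw [hcast, List.findSome?_cons, List.drop_eq_getElem_cons h, List.find?_cons]
        have hget : PySem.List.pyGet? delays ((a : Nat) : Int) = some delays[a] := by
          simp [PySem.List.pyGet?_natCast, List.getElem?_eq_getElem h]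
        rw [hget]
        by_cases hne : delays[a] ≠ c
        · simp [hne]
        · have IH := ih (a + 1) (by omega)
          simp [not_not.mp hne]
          rw [hcast]
          simpa using IH
      · have hle : delays.length ≤ a := by omega
        rw [PySem.List.pyRange_one_eq_nil (by exact_mod_cast hle), List.drop_eq_nil_of_le hle]
        rfl
  exact key (delays.length - a) a le_rfl

theorem gA_eq_wA (delays : List Int) (k : Nat) :
    gA delays (k : Int) = wA delays k := by
  unfold gA wA aNext
  have hcast : ((k : Int) + 1) = ((k + 1 : Nat) : Int) := by push_cast; ring
  by_cases h : (k : Int) = (delays.length : Int) - 1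
  · have hk1 : k + 1 = delays.length := by omega
    rw [if_pos h, hk1, List.drop_length]
    rfl
  · rw [if_neg h]
    simp only [PySem.List.pyGetD_natCast]
    rw [hcast, findSome_pyRange delays (delays.getD k 0) (k + 1)]
    rcases hfind : List.find? (fun v => decide (v ≠ delays.getD k 0)) (List.drop (k + 1) delays) with _ | v <;> rfl

theorem A_eq_map (delays : List Int) :
    get_speech_frame_list delays = (List.range delays.length).map (wA delays) := by
  unfold get_speech_frame_list
  have hstep : (fun (acc : List Int) (i : Int) =>
      if i = (delays.length : Int) - 1 then acc ++ [0]
      else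
        let di := PySem.List.pyGetD delays i 0
        match aNext delays di i with
        | none => acc ++ [0]
        | some v => acc ++ [v - di])
    = (fun (acc : List Int) (i : Int) => acc ++ [gA delays i]) := by
    funext acc i
    unfold gA
    split
    · rfl
    · simp only
      split <;> rfl
  rw [hstep, PySem.List.foldl_append_singleton_eq_map, PySem.List.pyRange_one]
  simp only [sub_zero, Int.toNat_natCast, List.map_map]
  apply List.map_congr_left
  intro k _
  simp only [Function.comp_apply, zero_add]
  exact gA_eq_wA delays k

theorem map_wA_eq_specF (delays : List Int) :
    (List.range delays.length).map (wA delays) = specF delays := by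
  induction delays with
  | nil => rfl
  | cons d ds ih =>
    show (List.range (ds.length + 1)).map (wA (d :: ds)) = specF (d :: ds)
    rw [List.range_succ_eq_map, List.map_cons, List.map_map]
    have hhead : wA (d :: ds) 0 =
        (match ds.find? (fun v => decide (v ≠ d)) with
         | some v => v - d
         | none => 0) := by
      unfold wA
      simp
    have htail : (List.range ds.length).map (wA (d :: ds) ∘ Nat.succ)
        = (List.range ds.length).map (wA ds) := by
      apply List.map_congr_left
      intro k _
      simp only [Function.comp_apply]
      unfold wA
      simp
    rw [hhead, htail, ih]
    rfl

theorem alt_loop (xs : List Int) :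
    xs.reverse.foldl altStep (none, 0, []) =
      (xs.head?, (specF xs).headD 0, (specF xs).reverse) := by
  induction xs with
  | nil => rfl
  | cons d t ih =>
    rw [List.reverse_cons, List.foldl_append, ih]
    cases t with
    | nil => simp [altStep, specF]
    | cons e t' =>
      by_cases h : e = d
      · subst h
        simp [altStep, specF]
      · simp [altStep, specF, h]

theorem alt_eq_specF (xs : List Int) : get_speech_frame_list_alt xs = specF xs := by
  unfold get_speech_frame_list_alt
  rw [alt_loop, List.reverse_reverse]

-- ===== VERDICT (by name: the statement is the Claim_ definition above) =====
theorem get_speech_frame_list_spec : Claim_equal_get_speech_frame_list := by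
  intro delays _
  unfold Spec_get_speech_frame_list
  rw [A_eq_map, map_wA_eq_specF, alt_eq_specF]
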